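-- pv_equiv track=rewrite | github.com/denisbereziat/Clusters | tools.py | find_list_of_closest_with_hash
-- ===== SOURCE A (Python) =====
-- def hash_pos(x, y, min_x, min_y, step_x, step_y):
--     x_pos = (x - min_x) // step_x
--     y_pos = (y - min_y) // step_y
--     return x_pos, y_pos
--
-- def find_list_of_closest_with_hash(x, y, hash_map, min_x, min_y, step_x, step_y, resolution):
--     h = hash_pos(x, y, min_x, min_y, step_x, step_y)
--     possible_closest = []
--     found = False
--     radius = 1
--     while not found:
--         if radius > resolution:
--             raise Exception
--         for x in range(-radius, radius+1):
--             for y in range(-radius, radius+1):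
--                 _h = (h[0] + x, h[1] + y)
--                 if _h in hash_map:
--                     # TODO ON AJOUTE DES DOUBLONS LA
--                     possible_closest += hash_map[_h]
--                     found = True
--         radius += 1
--     return possible_closest
-- ===== SOURCE B (Python) =====
-- def find_list_of_closest_with_hash(x, y, hash_map, min_x, min_y, step_x, step_y, resolution):
--     hx = (x - min_x) // step_x
--     hy = (y - min_y) // step_y
--     dists = [max(abs(kx - hx), abs(ky - hy)) for (kx, ky) in hash_map]
--     if not dists:
--         raise Exception
--     r = max(1, min(dists))
--     if r > resolution:
--         raise Exception
--     out = []
--     for dx in range(-r, r + 1):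
--         for dy in range(-r, r + 1):
--             cell = (hx + dx, hy + dy)
--             if cell in hash_map:
--                 out += hash_map[cell]
--     return out
-- ===== Notes on version B (the rewrite author's own statement) =====
-- stated objective: alternative
-- what changed: Instead of growing the radius one step at a time and rescanning the whole (2r+1)^2 square at every radius until a hit, B computes the minimum Chebyshev distance from the hashed cell to the occupied cells in one pass over the keys, clamps it to at least 1, and does a single square scan at that radius.
import Mathlib
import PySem

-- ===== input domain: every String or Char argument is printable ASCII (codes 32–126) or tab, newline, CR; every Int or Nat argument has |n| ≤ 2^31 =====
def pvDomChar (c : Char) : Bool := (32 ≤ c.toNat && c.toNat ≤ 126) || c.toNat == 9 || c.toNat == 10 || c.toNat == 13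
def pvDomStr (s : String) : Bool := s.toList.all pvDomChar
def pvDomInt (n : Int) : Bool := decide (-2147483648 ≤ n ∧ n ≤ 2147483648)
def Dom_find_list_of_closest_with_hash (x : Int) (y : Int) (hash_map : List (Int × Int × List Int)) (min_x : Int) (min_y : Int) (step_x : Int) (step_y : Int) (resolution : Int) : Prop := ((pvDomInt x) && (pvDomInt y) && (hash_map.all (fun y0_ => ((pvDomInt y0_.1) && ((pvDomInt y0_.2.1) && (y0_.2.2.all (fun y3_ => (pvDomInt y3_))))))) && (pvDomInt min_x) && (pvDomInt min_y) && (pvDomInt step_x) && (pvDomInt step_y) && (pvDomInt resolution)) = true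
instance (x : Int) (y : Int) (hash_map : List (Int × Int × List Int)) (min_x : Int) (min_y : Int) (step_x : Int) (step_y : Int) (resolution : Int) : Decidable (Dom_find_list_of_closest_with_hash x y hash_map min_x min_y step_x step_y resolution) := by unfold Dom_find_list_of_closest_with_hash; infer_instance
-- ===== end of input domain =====

-- B replaces A's grow-the-radius-and-rescan loop by one pass over the occupied cells computing the
-- minimum Chebyshev distance (clamped to ≥ 1) followed by a single square scan at that radius.

-- The hash_map dict (keys (Int, Int), values List Int) arrives as an association list; both ports
-- view it through this conversion, which is Python's dict semantics (last value wins, first position).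
def pvDict (hash_map : List (Int × Int × List Int)) : PySem.Dict (Int × Int) (List Int) :=
  hash_map.foldl (fun d e => d.insert (e.1, e.2.1) e.2.2) PySem.Dict.empty

-- ===== PORT A =====
def pvHashPos (x : Int) (y : Int) (min_x : Int) (min_y : Int) (step_x : Int) (step_y : Int) : Int × Int :=
  (PySem.Int.floordiv (x - min_x) step_x, PySem.Int.floordiv (y - min_y) step_y)

-- the body of A's while-loop for one radius: the two nested for-loops updating (possible_closest, found)
def pvScanA (d : PySem.Dict (Int × Int) (List Int)) (h : Int × Int) (radius : Int)
    (st : List Int × Bool) : List Int × Bool :=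
  (PySem.List.pyRange (-radius) (radius+1) 1).foldl (fun acc xx =>
    (PySem.List.pyRange (-radius) (radius+1) 1).foldl (fun acc yy =>
      if d.contains (h.1 + xx, h.2 + yy) then (acc.1 ++ d.getD (h.1 + xx, h.2 + yy) [], true)
      else acc) acc) st

-- A's while-loop; fuel = number of radii the loop may still try before `radius > resolution`
-- would raise (the raise is excluded by Pre_; the fuel-0 value is never reached under it).
def pvLoopA (d : PySem.Dict (Int × Int) (List Int)) (h : Int × Int) :
    Nat → Int → List Int × Bool → List Int
  | 0, _, st => st.1
  | fuel+1, radius, st =>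
      let st' := pvScanA d h radius st
      if st'.2 then st'.1 else pvLoopA d h fuel (radius+1) st'

def find_list_of_closest_with_hash (x : Int) (y : Int) (hash_map : List (Int × Int × List Int)) (min_x : Int) (min_y : Int) (step_x : Int) (step_y : Int) (resolution : Int) : List Int :=
  let h := pvHashPos x y min_x min_y step_x step_y
  pvLoopA (pvDict hash_map) h resolution.toNat 1 ([], false)

-- ===== PORT B =====
-- B's single square scan at the final radius (no found flag, plain accumulator)
def pvScanB (d : PySem.Dict (Int × Int) (List Int)) (hx hy r : Int) : List Int :=
  (PySem.List.pyRange (-r) (r+1) 1).foldl (fun out dx =>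
    (PySem.List.pyRange (-r) (r+1) 1).foldl (fun out dy =>
      if d.contains (hx + dx, hy + dy) then out ++ d.getD (hx + dx, hy + dy) [] else out) out) []

def find_list_of_closest_with_hash_alt (x : Int) (y : Int) (hash_map : List (Int × Int × List Int)) (min_x : Int) (min_y : Int) (step_x : Int) (step_y : Int) (resolution : Int) : List Int :=
  let hx := PySem.Int.floordiv (x - min_x) step_x
  let hy := PySem.Int.floordiv (y - min_y) step_y
  let d := pvDict hash_map
  let dists := d.keys.map (fun k => max |k.1 - hx| |k.2 - hy|)
  match PySem.List.min? dists (fun v => v) with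
  | none => []        -- raise Exception (excluded by Pre_)
  | some dmin =>
      let r := max 1 dmin
      if r > resolution then []   -- raise Exception (excluded by Pre_)
      else pvScanB d hx hy r

-- ===== PRECONDITION & SPEC =====
-- Pre_ excludes exactly the inputs where A raises: step_x = 0 or step_y = 0 (ZeroDivisionError),
-- and the bare-Exception case where no occupied cell lies within the clamped search radius bound.
def Pre_find_list_of_closest_with_hash (x : Int) (y : Int) (hash_map : List (Int × Int × List Int)) (min_x : Int) (min_y : Int) (step_x : Int) (step_y : Int) (resolution : Int) : Prop :=
  step_x ≠ 0 ∧ step_y ≠ 0 ∧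
  ∃ e ∈ hash_map,
    max 1 (max |e.1 - PySem.Int.floordiv (x - min_x) step_x|
               |e.2.1 - PySem.Int.floordiv (y - min_y) step_y|) ≤ resolution
instance (x : Int) (y : Int) (hash_map : List (Int × Int × List Int)) (min_x : Int) (min_y : Int) (step_x : Int) (step_y : Int) (resolution : Int) : Decidable (Pre_find_list_of_closest_with_hash x y hash_map min_x min_y step_x step_y resolution) := by unfold Pre_find_list_of_closest_with_hash; infer_instance

def pvWitness_find_list_of_closest_with_hash : Int × Int × (List (Int × Int × List Int)) × Int × Int × Int × Int × Int :=
  (0, 0, [(0, 0, [5])], 0, 0, 1, 1, 1)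

def Spec_find_list_of_closest_with_hash (x : Int) (y : Int) (hash_map : List (Int × Int × List Int)) (min_x : Int) (min_y : Int) (step_x : Int) (step_y : Int) (resolution : Int) (out : List Int) : Prop := out = find_list_of_closest_with_hash_alt x y hash_map min_x min_y step_x step_y resolution
instance (x : Int) (y : Int) (hash_map : List (Int × Int × List Int)) (min_x : Int) (min_y : Int) (step_x : Int) (step_y : Int) (resolution : Int) (out : List Int) : Decidable (Spec_find_list_of_closest_with_hash x y hash_map min_x min_y step_x step_y resolution out) := by unfold Spec_find_list_of_closest_with_hash; infer_instance

-- ===== CLAIM (what is proved, stated in full; the proofs are below) =====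
def Claim_equal_find_list_of_closest_with_hash : Prop := ∀ (x : Int) (y : Int) (hash_map : List (Int × Int × List Int)) (min_x : Int) (min_y : Int) (step_x : Int) (step_y : Int) (resolution : Int), Dom_find_list_of_closest_with_hash x y hash_map min_x min_y step_x step_y resolution → Pre_find_list_of_closest_with_hash x y hash_map min_x min_y step_x step_y resolution → Spec_find_list_of_closest_with_hash x y hash_map min_x min_y step_x step_y resolution (find_list_of_closest_with_hash x y hash_map min_x min_y step_x step_y resolution)

-- ===== LEMMAS AND PROOFS =====

-- the flat list of values collected by one square scan, and whether the scan hits any key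
def pvSq (d : PySem.Dict (Int × Int) (List Int)) (hx hy r : Int) : List Int :=
  (PySem.List.pyRange (-r) (r+1) 1).flatMap (fun dx =>
    (PySem.List.pyRange (-r) (r+1) 1).flatMap (fun dy =>
      if d.contains (hx + dx, hy + dy) then d.getD (hx + dx, hy + dy) [] else []))

def pvHit (d : PySem.Dict (Int × Int) (List Int)) (hx hy r : Int) : Bool :=
  (PySem.List.pyRange (-r) (r+1) 1).any (fun dx =>
    (PySem.List.pyRange (-r) (r+1) 1).any (fun dy => d.contains (hx + dx, hy + dy)))

theorem pvInnerA (d : PySem.Dict (Int × Int) (List Int)) (hx hy : Int) (dx : Int) (L : List Int)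
    (st : List Int × Bool) :
    L.foldl (fun acc yy =>
      if d.contains (hx + dx, hy + yy) then (acc.1 ++ d.getD (hx + dx, hy + yy) [], true) else acc) st
    = (st.1 ++ L.flatMap (fun yy => if d.contains (hx + dx, hy + yy) then d.getD (hx + dx, hy + yy) [] else []),
       st.2 || L.any (fun yy => d.contains (hx + dx, hy + yy))) := by
  induction L generalizing st with
  | nil => simp
  | cons a t ih =>
      simp only [List.foldl_cons, List.flatMap_cons, List.any_cons]
      by_cases hc : d.contains (hx + dx, hy + a)
      · simp [hc, ih, List.append_assoc]
      · simp [hc, ih]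

theorem pvScanA_eq (d : PySem.Dict (Int × Int) (List Int)) (h : Int × Int) (r : Int)
    (st : List Int × Bool) :
    pvScanA d h r st = (st.1 ++ pvSq d h.1 h.2 r, st.2 || pvHit d h.1 h.2 r) := by
  unfold pvScanA pvSq pvHit
  suffices H : ∀ (L : List Int) (st : List Int × Bool),
      L.foldl (fun acc xx =>
        (PySem.List.pyRange (-r) (r+1) 1).foldl (fun acc yy =>
          if d.contains (h.1 + xx, h.2 + yy) then (acc.1 ++ d.getD (h.1 + xx, h.2 + yy) [], true)
          else acc) acc) st
      = (st.1 ++ L.flatMap (fun dx =>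
            (PySem.List.pyRange (-r) (r+1) 1).flatMap (fun dy =>
              if d.contains (h.1 + dx, h.2 + dy) then d.getD (h.1 + dx, h.2 + dy) [] else [])),
         st.2 || L.any (fun dx =>
            (PySem.List.pyRange (-r) (r+1) 1).any (fun dy => d.contains (h.1 + dx, h.2 + dy)))) by
    exact H _ st
  intro L
  induction L with
  | nil => simp
  | cons a t ih =>
      intro st
      simp only [List.foldl_cons, List.flatMap_cons, List.any_cons]
      rw [pvInnerA, ih]
      simp [List.append_assoc, Bool.or_assoc]

theorem pvScanB_eq (d : PySem.Dict (Int × Int) (List Int)) (hx hy r : Int) :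
    pvScanB d hx hy r = pvSq d hx hy r := by
  unfold pvScanB pvSq
  suffices H : ∀ (L : List Int) (acc : List Int),
      L.foldl (fun out dx =>
        (PySem.List.pyRange (-r) (r+1) 1).foldl (fun out dy =>
          if d.contains (hx + dx, hy + dy) then out ++ d.getD (hx + dx, hy + dy) [] else out) out) acc
      = acc ++ L.flatMap (fun dx =>
          (PySem.List.pyRange (-r) (r+1) 1).flatMap (fun dy =>
            if d.contains (hx + dx, hy + dy) then d.getD (hx + dx, hy + dy) [] else [])) by
    simpa using H _ []
  intro L
  induction L with
  | nil => simp
  | cons a t ih =>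
      intro acc
      simp only [List.foldl_cons, List.flatMap_cons]
      rw [show (fun (out : List Int) dy =>
            if d.contains (hx + a, hy + dy) then out ++ d.getD (hx + a, hy + dy) [] else out)
          = (fun out dy => out ++ (if d.contains (hx + a, hy + dy) then d.getD (hx + a, hy + dy) [] else []))
          from by funext out dy; by_cases hc : d.contains (hx + a, hy + dy) <;> simp [hc]]
      rw [PySem.List.foldl_append_eq_flatMap]
      rw [ih]
      simp [List.append_assoc]

-- membership in the dict's keys is membership among the association list's keys
theorem pvMemKeys (hash_map : List (Int × Int × List Int)) (k : Int × Int) :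
    k ∈ (pvDict hash_map).keys ↔ ∃ e ∈ hash_map, (e.1, e.2.1) = k := by
  unfold pvDict
  rw [PySem.Dict.keys_foldl_insert_key hash_map (fun e => (e.1, e.2.1))
        (fun _ e => e.2.2) PySem.Dict.empty]
  rw [PySem.Set.mem_update]
  simp [PySem.Dict.keys_empty, List.mem_map]

-- the scan at radius r hits a key iff some key is within Chebyshev distance r
theorem pvHit_iff (d : PySem.Dict (Int × Int) (List Int)) (hx hy r : Int) :
    pvHit d hx hy r = true ↔ ∃ k ∈ d.keys, max |k.1 - hx| |k.2 - hy| ≤ r := by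
  unfold pvHit
  simp only [List.any_eq_true, PySem.List.mem_pyRange_one]
  constructor
  · rintro ⟨dx, ⟨h1, h2⟩, dy, ⟨h3, h4⟩, hc⟩
    refine ⟨(hx + dx, hy + dy), (PySem.Dict.contains_iff_mem_keys _ _).1 hc, ?_⟩
    have h5 : hx + dx - hx = dx := by ring
    have h6 : hy + dy - hy = dy := by ring
    simp only [h5, h6]
    rw [max_le_iff, abs_le, abs_le]
    omega
  · rintro ⟨k, hk, hcheb⟩
    rw [max_le_iff, abs_le, abs_le] at hcheb
    refine ⟨k.1 - hx, by omega, k.2 - hy, by omega, ?_⟩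
    have : (hx + (k.1 - hx), hy + (k.2 - hy)) = k := by
      cases k with
      | mk a b => simp only [Prod.mk.injEq]; omega
    rw [this]
    exact (PySem.Dict.contains_iff_mem_keys _ _).2 hk

theorem pvSq_nil (d : PySem.Dict (Int × Int) (List Int)) (hx hy r : Int)
    (h : pvHit d hx hy r = false) : pvSq d hx hy r = [] := by
  unfold pvHit at h
  unfold pvSq
  rw [List.flatMap_eq_nil_iff]
  intro dx hdx
  rw [List.flatMap_eq_nil_iff]
  intro dy hdy
  rw [List.any_eq_false] at h
  have h2 := h dx hdx
  rw [Bool.not_eq_true, List.any_eq_false] at h2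
  simp [h2 dy hdy]

-- running A's loop: with enough fuel it stops exactly at radius max 1 dmin and returns that scan
theorem pvLoop_run (d : PySem.Dict (Int × Int) (List Int)) (hx hy : Int) (dmin : Int)
    (hmin : PySem.List.min? (d.keys.map (fun k => max |k.1 - hx| |k.2 - hy|)) (fun v => v) = some dmin) :
    ∀ (fuel : Nat) (radius : Int), 1 ≤ radius → radius ≤ max 1 dmin →
      max 1 dmin < radius + (fuel : Int) →
      pvLoopA d (hx, hy) fuel radius ([], false) = pvSq d hx hy (max 1 dmin) := by
  intro fuel
  induction fuel with
  | zero => intro radius h1 h2 h3; simp at h3; omega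
  | succ f ih =>
      intro radius h1 h2 h3
      have hdmin0 : 0 ≤ dmin := by
        have hmem := PySem.List.min?_mem hmin
        simp only [List.mem_map] at hmem
        obtain ⟨k, _, hk⟩ := hmem
        have := abs_nonneg (k.1 - hx)
        omega
      rw [pvLoopA, pvScanA_eq]
      simp only [Bool.false_or, List.nil_append]
      by_cases heq : radius = max 1 dmin
      · subst heq
        have hhit : pvHit d hx hy (max 1 dmin) = true := by
          rw [pvHit_iff]
          have hmem := PySem.List.min?_mem hmin
          simp only [List.mem_map] at hmem
          obtain ⟨k, hk, hkeq⟩ := hmem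
          exact ⟨k, hk, by omega⟩
        simp [hhit]
      · have hlt : radius < max 1 dmin := by omega
        have hnot : pvHit d hx hy radius = false := by
          by_contra habs
          rw [Bool.not_eq_false, pvHit_iff] at habs
          obtain ⟨k, hk, hcheb⟩ := habs
          have hle := PySem.List.min?_isMin hmin (max |k.1 - hx| |k.2 - hy|)
            (List.mem_map_of_mem hk)
          simp at hle
          omega
        rw [hnot, pvSq_nil d hx hy radius hnot]
        simp only [Bool.false_eq_true, if_false]
        exact ih (radius + 1) (by omega) (by omega) (by omega)

-- ===== VERDICT (by name: the statement is the Claim_ definition above) =====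
theorem find_list_of_closest_with_hash_spec : Claim_equal_find_list_of_closest_with_hash := by
  intro x y hash_map min_x min_y step_x step_y resolution _hdom hpre
  obtain ⟨hsx, hsy, e, he, hres⟩ := hpre
  unfold Spec_find_list_of_closest_with_hash
  simp only [find_list_of_closest_with_hash, find_list_of_closest_with_hash_alt, pvHashPos]
  set hx := PySem.Int.floordiv (x - min_x) step_x with hhx
  set hy := PySem.Int.floordiv (y - min_y) step_y with hhy
  set d := pvDict hash_map with hd
  set dists := d.keys.map (fun k => max |k.1 - hx| |k.2 - hy|) with hdists
  have hkmem : (e.1, e.2.1) ∈ d.keys := (pvMemKeys hash_map _).2 ⟨e, he, rfl⟩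
  have hne : dists ≠ [] := by
    intro hnil
    rw [hdists, List.map_eq_nil_iff] at hnil
    rw [hnil] at hkmem
    exact (List.not_mem_nil) hkmem
  obtain ⟨dmin, hmin⟩ : ∃ m, PySem.List.min? dists (fun v => v) = some m := by
    cases hm : PySem.List.min? dists (fun v => v) with
    | none => exact absurd ((PySem.List.min?_eq_none_iff _ _).1 hm) hne
    | some m => exact ⟨m, rfl⟩
  have hdle : dmin ≤ max |e.1 - hx| |e.2.1 - hy| := by
    have := PySem.List.min?_isMin hmin (max |e.1 - hx| |e.2.1 - hy|)
      (by rw [hdists]; exact List.mem_map_of_mem hkmem)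
    simpa using this
  have hrle : max 1 dmin ≤ resolution := by omega
  rw [hmin]
  simp only [if_neg (by omega : ¬ max 1 dmin > resolution)]
  rw [pvScanB_eq]
  have hfuel : max 1 dmin < 1 + (resolution.toNat : Int) := by omega
  exact pvLoop_run d hx hy dmin (by rw [← hdists]; exact hmin) resolution.toNat 1
    (by omega) (by omega) hfuel
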